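-- pv_equiv track=rewrite | github.com/JohnnyArachnid/University | 2024-2025/Python/Lab3/exercises.py | exercise_3_6
-- ===== SOURCE A (Python) =====
-- def exercise_3_6(height: int, width: int) -> str:
--     # Dodałem ograniczenie na szerokość i dlugość prostokata ponieważ nie istnieje dlugość i szerekość mniejsza od 0 w dodatku w ramach ograniczeń pojemności terminala postanowiłem ustalić maksymalną dlugość i szerokość na maks 100
--     if height <= 0 or width <= 0 or height >= 100 or width >= 100:
--         return "Podaj wysokość oraz szerokość prostokąta w granicach od 1 do 99"
--
--     top_line = "+---" * width + "+"
--     middle_line = "|   " * width + "|"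
--
--     rectangle = []
--     for _ in range(height):
--         rectangle.append(top_line)
--         rectangle.append(middle_line)
--     rectangle.append(top_line)
--
--     return "\n".join(rectangle)
-- ===== SOURCE B (Python) =====
-- def exercise_3_6(height: int, width: int) -> str:
--     if height <= 0 or width <= 0 or height >= 100 or width >= 100:
--         return "Podaj wysokość oraz szerokość prostokąta w granicach od 1 do 99"
--
--     def cell(r: int, c: int) -> str:
--         # the grid is a pure function of coordinates: junction characters sit
--         # where the row is even and the column is a multiple of 4
--         if r % 2 == 0:
--             return "+" if c % 4 == 0 else "-"
--         return "|" if c % 4 == 0 else " "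
--
--     return "\n".join(
--         "".join(cell(r, c) for c in range(4 * width + 1))
--         for r in range(2 * height + 1)
--     )
-- ===== Notes on version B (the rewrite author's own statement) =====
-- stated objective: alternative
-- what changed: Instead of precomputing a border line and an interior line and repeating them per row, B computes each character directly from its (row, column) coordinates by parity (row even/odd, column mod 4) and assembles the grid with nested joins over coordinate ranges.
import Mathlib
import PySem

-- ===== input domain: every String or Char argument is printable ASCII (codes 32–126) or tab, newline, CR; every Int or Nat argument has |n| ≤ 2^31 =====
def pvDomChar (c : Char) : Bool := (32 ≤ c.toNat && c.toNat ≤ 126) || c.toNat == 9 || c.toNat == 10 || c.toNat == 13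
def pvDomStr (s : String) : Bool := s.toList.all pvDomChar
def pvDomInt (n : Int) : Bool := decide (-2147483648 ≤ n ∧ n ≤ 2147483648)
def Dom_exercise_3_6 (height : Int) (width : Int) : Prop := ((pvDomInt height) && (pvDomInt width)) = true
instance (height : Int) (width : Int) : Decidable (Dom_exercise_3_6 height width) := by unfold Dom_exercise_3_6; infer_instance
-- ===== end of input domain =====

-- B computes each grid character directly from its (row, column) coordinates by parity (row mod 2, column mod 4) instead of building and repeating whole border/interior lines; objective: alternative.
-- ===== PORT A =====
def exercise_3_6 (height : Int) (width : Int) : String :=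
  if height ≤ 0 ∨ width ≤ 0 ∨ height ≥ 100 ∨ width ≥ 100 then
    "Podaj wysokość oraz szerokość prostokąta w granicach od 1 do 99"
  else
    let top_line : List Char := PySem.List.pyRepeat "+---".toList width ++ "+".toList
    let middle_line : List Char := PySem.List.pyRepeat "|   ".toList width ++ "|".toList
    let rectangle : List (List Char) :=
      (PySem.List.pyRange 0 height).foldl (fun acc _ => acc ++ [top_line, middle_line]) []
    String.ofList (PySem.Chars.join "\n".toList (rectangle ++ [top_line]))

-- ===== PORT B =====
-- Source B's local helper cell(r, c): '+'/'-' on even rows, '|'/' ' on odd rows, junction column iff c % 4 == 0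
def pvCell (r c : Int) : Char :=
  if PySem.Int.mod r 2 = 0 then (if PySem.Int.mod c 4 = 0 then '+' else '-')
  else (if PySem.Int.mod c 4 = 0 then '|' else ' ')

def exercise_3_6_alt (height : Int) (width : Int) : String :=
  if height ≤ 0 ∨ width ≤ 0 ∨ height ≥ 100 ∨ width ≥ 100 then
    "Podaj wysokość oraz szerokość prostokąta w granicach od 1 do 99"
  else
    String.ofList (PySem.Chars.join "\n".toList
      ((PySem.List.pyRange 0 (2*height+1)).map (fun r =>
        (PySem.List.pyRange 0 (4*width+1)).map (fun c => pvCell r c))))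

-- ===== PRECONDITION & SPEC =====
def Spec_exercise_3_6 (height : Int) (width : Int) (out : String) : Prop := out = exercise_3_6_alt height width
instance (height : Int) (width : Int) (out : String) : Decidable (Spec_exercise_3_6 height width out) := by unfold Spec_exercise_3_6; infer_instance

-- ===== CLAIM (what is proved, stated in full; the proofs are below) =====
def Claim_equal_exercise_3_6 : Prop := ∀ (height : Int) (width : Int), Dom_exercise_3_6 height width → Spec_exercise_3_6 height width (exercise_3_6 height width)

-- ===== LEMMAS AND PROOFS =====
theorem pymod_eq (a b : Int) (hb : 0 ≤ b) : PySem.Int.mod a b = a % b := by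
  unfold PySem.Int.mod; rw [Int.fmod_eq_emod]; simp [hb]

def pvPlus (r : Int) : Char := if r % 2 = 0 then '+' else '|'
def pvDash (r : Int) : Char := if r % 2 = 0 then '-' else ' '

theorem pvCell_plus (r c : Int) (h : c % 4 = 0) : pvCell r c = pvPlus r := by
  simp only [pvCell, pvPlus, pymod_eq _ 2 (by omega), pymod_eq _ 4 (by omega), h, if_pos]

theorem pvCell_dash (r c : Int) (h : c % 4 ≠ 0) : pvCell r c = pvDash r := by
  simp only [pvCell, pvDash, pymod_eq _ 2 (by omega), pymod_eq _ 4 (by omega), if_neg h]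

theorem pvCell_congr (r1 r2 c : Int) (h : r1 % 2 = r2 % 2) : pvCell r1 c = pvCell r2 c := by
  simp [pvCell, h]

-- one row of B's grid is a periodic pattern of four characters plus a closing junction
theorem row_map (n : Nat) (r : Int) :
    (List.range (4*n+1)).map (fun (k : Nat) => pvCell r (k : Int))
      = (List.replicate n [pvPlus r, pvDash r, pvDash r, pvDash r]).flatten ++ [pvPlus r] := by
  induction n with
  | zero =>
    simp [List.range_succ, pvCell_plus r 0 (by omega)]
  | succ m ih =>
    have h4 : 4*(m+1)+1 = (4*m+1)+1+1+1+1 := by ring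
    rw [h4, List.range_succ, List.range_succ, List.range_succ, List.range_succ]
    simp only [List.map_append, List.map_cons, List.map_nil, ih]
    rw [pvCell_dash r ((4*m+1 : Nat) : Int) (by push_cast; omega),
        pvCell_dash r ((4*m+1+1 : Nat) : Int) (by push_cast; omega),
        pvCell_dash r ((4*m+1+1+1 : Nat) : Int) (by push_cast; omega),
        pvCell_plus r ((4*m+1+1+1+1 : Nat) : Int) (by push_cast; omega)]
    rw [List.replicate_succ', List.flatten_append]
    simp

-- the rows of B's grid alternate between two lines determined only by row parity
theorem grid_map (m : Nat) (line : Int → List Char)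
    (hline : ∀ r1 r2 : Int, r1 % 2 = r2 % 2 → line r1 = line r2) :
    (List.range (2*m+1)).map (fun (k : Nat) => line (k : Int))
      = (List.replicate m [line 0, line 1]).flatten ++ [line 0] := by
  induction m with
  | zero => simp [List.range_succ]
  | succ p ih =>
    have h2 : 2*(p+1)+1 = (2*p+1)+1+1 := by ring
    rw [h2, List.range_succ, List.range_succ]
    simp only [List.map_append, List.map_cons, List.map_nil, ih]
    rw [hline ((2*p+1 : Nat) : Int) 1 (by push_cast; omega),
        hline ((2*p+1+1 : Nat) : Int) 0 (by push_cast; omega)]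
    rw [List.replicate_succ', List.flatten_append]
    simp

theorem pyRepeat_eq (xs : List Char) (n : Int) :
    PySem.List.pyRepeat xs n = (List.replicate n.toNat xs).flatten := by
  simp [PySem.List.pyRepeat]

-- B's row r equals A's top line (even r) / middle line (odd r)
theorem line_eq (w : Int) (hw : 0 ≤ w) (r : Int) :
    (PySem.List.pyRange 0 (4*w+1)).map (fun c => pvCell r c)
      = PySem.List.pyRepeat (if r % 2 = 0 then "+---" else "|   ").toList w ++ [pvPlus r] := by
  rw [PySem.List.pyRange_one, List.map_map]
  have hn : (4*w+1 - 0).toNat = 4*w.toNat + 1 := by omega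
  rw [hn]
  rw [show (List.range (4*w.toNat+1)).map ((fun c => pvCell r c) ∘ fun (k : Nat) => (0:Int) + ↑k)
      = (List.range (4*w.toNat+1)).map (fun (k : Nat) => pvCell r (k : Int)) from
    List.map_congr_left (fun k _ => by simp)]
  rw [row_map, pyRepeat_eq]
  by_cases hr : r % 2 = 0 <;> simp [hr, pvPlus, pvDash]

-- A's loop appends the pair [top, middle] once per iteration
theorem foldl_two_append {α β : Type} (l : List α) (a b : β) (init : List β) :
    l.foldl (fun acc _ => acc ++ [a, b]) init
      = init ++ (List.replicate l.length [a, b]).flatten := by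
  induction l generalizing init with
  | nil => simp
  | cons x xs ih => simp [List.foldl_cons, ih, List.replicate_succ]

-- ===== VERDICT (by name: the statement is the Claim_ definition above) =====
theorem exercise_3_6_spec : Claim_equal_exercise_3_6 := by
  intro height width _
  unfold Spec_exercise_3_6 exercise_3_6 exercise_3_6_alt
  split
  · rfl
  · rename_i hguard
    simp only [not_or, not_le] at hguard
    obtain ⟨h1, h2, _, _⟩ := hguard
    dsimp only
    rw [foldl_two_append, PySem.List.length_pyRange_one, List.nil_append]
    rw [PySem.List.pyRange_one 0 (2*height+1), List.map_map]
    have hm : (2*height+1 - 0).toNat = 2*height.toNat + 1 := by omega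
    rw [hm]
    rw [show (List.range (2*height.toNat+1)).map
          ((fun r => (PySem.List.pyRange 0 (4*width+1)).map (fun c => pvCell r c)) ∘ fun (k : Nat) => (0:Int) + ↑k)
        = (List.range (2*height.toNat+1)).map
          (fun (k : Nat) => (PySem.List.pyRange 0 (4*width+1)).map (fun c => pvCell (k : Int) c)) from
      List.map_congr_left (fun k _ => by simp)]
    rw [grid_map height.toNat _ (fun r1 r2 h => List.map_congr_left (fun c _ => pvCell_congr r1 r2 c h))]
    rw [line_eq width (by omega) 0, line_eq width (by omega) 1]
    have hh : (height - 0).toNat = height.toNat := by omega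
    rw [hh]
    norm_num [pvPlus]
    rfl
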